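-- pv_equiv track=rewrite | github.com/josecoello21/Introduction_to_Scripting_in_Python | 4_Python_Data_Visualization/Week_4/assessment_project/assessment_project.py | reconcile_countries_by_code
-- ===== SOURCE A (Python) =====
-- def reconcile_countries_by_code(codeinfo, plot_countries, gdp_countries):
--     """
--     Inputs:
--       codeinfo       - A country code information dictionary
--       plot_countries - Dictionary whose keys are plot library country codes
--                        and values are the corresponding country name
--       gdp_countries  - Dictionary whose keys are country codes used in GDP data
--
--     Output:
--       A tuple containing a dictionary and a set.  The dictionary maps
--       country codes from plot_countries to country codes from
--       gdp_countries.  The set contains the country codes from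
--       plot_countries that did not have a country with a corresponding
--       code in gdp_countries.
--
--       Note that all codes should be compared in a case-insensitive
--       way.  However, the returned dictionary and set should include
--       the codes with the exact same case as they have in
--       plot_countries and gdp_countries.
--     """
--     my_dict, my_set = {}, set()
--     countries = {gdp_countries[key]['Country Name']: key for key in gdp_countries}
--
--     for key in plot_countries:
--         if plot_countries[key] in countries:
--             my_dict[key] = countries[plot_countries[key]]
--         else:
--             my_set.add(key)
--
--     return my_dict, my_set
-- ===== SOURCE B (Python) =====
-- def reconcile_countries_by_code(codeinfo, plot_countries, gdp_countries):
--     my_dict, my_set = {}, set()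
--     for pkey in plot_countries:
--         name = plot_countries[pkey]
--         found = False
--         match = None
--         for gkey in gdp_countries:
--             if gdp_countries[gkey]['Country Name'] == name:
--                 found = True
--                 match = gkey
--         if found:
--             my_dict[pkey] = match
--         else:
--             my_set.add(pkey)
--     return my_dict, my_set
-- ===== Notes on version B (the rewrite author's own statement) =====
-- stated objective: alternative
-- what changed: Dropped the precomputed name-to-code reverse dictionary; B scans gdp_countries directly for each plot entry, keeping a found flag and the last GDP code whose Country Name matches.
import Mathlib
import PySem

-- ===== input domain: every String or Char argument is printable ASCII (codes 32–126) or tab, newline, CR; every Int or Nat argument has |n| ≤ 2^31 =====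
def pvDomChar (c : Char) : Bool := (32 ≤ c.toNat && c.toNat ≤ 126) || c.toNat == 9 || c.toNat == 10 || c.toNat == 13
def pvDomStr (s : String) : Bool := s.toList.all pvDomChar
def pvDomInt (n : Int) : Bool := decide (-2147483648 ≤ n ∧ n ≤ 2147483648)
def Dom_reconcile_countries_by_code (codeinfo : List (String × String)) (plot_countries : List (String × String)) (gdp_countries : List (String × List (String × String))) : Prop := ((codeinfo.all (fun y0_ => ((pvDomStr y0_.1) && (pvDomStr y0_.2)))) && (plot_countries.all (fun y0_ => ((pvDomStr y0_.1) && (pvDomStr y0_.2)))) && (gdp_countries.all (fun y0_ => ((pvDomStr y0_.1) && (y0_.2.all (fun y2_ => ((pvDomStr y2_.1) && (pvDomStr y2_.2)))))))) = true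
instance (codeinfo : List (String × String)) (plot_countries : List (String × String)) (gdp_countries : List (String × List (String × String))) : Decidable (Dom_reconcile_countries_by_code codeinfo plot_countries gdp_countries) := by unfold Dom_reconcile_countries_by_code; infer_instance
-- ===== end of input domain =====

-- B drops A's precomputed name→code reverse dict and instead scans gdp_countries per plot entry, keeping the last matching code (alternative decomposition, same results).


-- ===== PORT A =====
def reconcile_countries_by_code (codeinfo : List (String × String)) (plot_countries : List (String × String)) (gdp_countries : List (String × List (String × String))) : (List (String × String)) × List String :=
  -- countries = {gdp_countries[key]['Country Name']: key for key in gdp_countries}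
  let countries : PySem.Dict String String :=
    gdp_countries.foldl (fun d p => d.insert ((PySem.Dict.mk p.2).getD "Country Name" "") p.1) PySem.Dict.empty
  -- for key in plot_countries: if plot_countries[key] in countries: … else my_set.add(key)
  let r : PySem.Dict String String × PySem.Set String :=
    plot_countries.foldl
      (fun acc kv =>
        if countries.contains kv.2 then (acc.1.insert kv.1 (countries.getD kv.2 ""), acc.2)
        else (acc.1, PySem.Set.add acc.2 kv.1))
      (PySem.Dict.empty, PySem.Set.ofList [])
  (r.1.items, r.2)

-- ===== PORT B =====
def reconcile_countries_by_code_alt (codeinfo : List (String × String)) (plot_countries : List (String × String)) (gdp_countries : List (String × List (String × String))) : (List (String × String)) × List String :=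
  -- for each plot entry: inner scan of gdp_countries with a found flag keeping the LAST matching code
  let r : PySem.Dict String String × PySem.Set String :=
    plot_countries.foldl
      (fun acc kv =>
        let fm : Bool × String :=
          gdp_countries.foldl
            (fun s p => if ((PySem.Dict.mk p.2).getD "Country Name" "") == kv.2 then (true, p.1) else s)
            (false, "")
        if fm.1 then (acc.1.insert kv.1 fm.2, acc.2)
        else (acc.1, PySem.Set.add acc.2 kv.1))
      (PySem.Dict.empty, PySem.Set.ofList [])
  (r.1.items, r.2)

-- ===== PRECONDITION & SPEC =====
-- Pre_ excludes exactly the inputs on which Python A raises KeyError: some gdp_countries value lacking the 'Country Name' key.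
def Pre_reconcile_countries_by_code (codeinfo : List (String × String)) (plot_countries : List (String × String)) (gdp_countries : List (String × List (String × String))) : Prop :=
  (gdp_countries.all (fun p => p.2.any (fun q => q.1 == "Country Name"))) = true
instance (codeinfo : List (String × String)) (plot_countries : List (String × String)) (gdp_countries : List (String × List (String × String))) : Decidable (Pre_reconcile_countries_by_code codeinfo plot_countries gdp_countries) := by unfold Pre_reconcile_countries_by_code; infer_instance

def pvWitness_reconcile_countries_by_code : (List (String × String)) × (List (String × String)) × (List (String × List (String × String))) :=
  ([], [("us", "United States"), ("fr", "France")], [("USA", [("Country Name", "United States")])])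

def Spec_reconcile_countries_by_code (codeinfo : List (String × String)) (plot_countries : List (String × String)) (gdp_countries : List (String × List (String × String))) (out : (List (String × String)) × List String) : Prop := out = reconcile_countries_by_code_alt codeinfo plot_countries gdp_countries
instance (codeinfo : List (String × String)) (plot_countries : List (String × String)) (gdp_countries : List (String × List (String × String))) (out : (List (String × String)) × List String) : Decidable (Spec_reconcile_countries_by_code codeinfo plot_countries gdp_countries out) := by unfold Spec_reconcile_countries_by_code; infer_instance

-- ===== CLAIM (what is proved, stated in full; the proofs are below) =====
def Claim_equal_reconcile_countries_by_code : Prop := ∀ (codeinfo : List (String × String)) (plot_countries : List (String × String)) (gdp_countries : List (String × List (String × String))), Dom_reconcile_countries_by_code codeinfo plot_countries gdp_countries → Pre_reconcile_countries_by_code codeinfo plot_countries gdp_countries → Spec_reconcile_countries_by_code codeinfo plot_countries gdp_countries (reconcile_countries_by_code codeinfo plot_countries gdp_countries)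
-- ===== LEMMAS AND PROOFS =====

-- The flag in B's inner scan never resets once set.
lemma pv_flag_stays (rest : List (String × List (String × String))) (n : String) :
    ∀ m : String, (rest.foldl (fun s p => if ((PySem.Dict.mk p.2).getD "Country Name" "") == n then (true, p.1) else s) (true, m)).1 = true := by
  induction rest with
  | nil => intro m; rfl
  | cons p r ih =>
    intro m
    simp only [List.foldl_cons]
    by_cases hc : (((PySem.Dict.mk p.2).getD "Country Name" "") == n) = true
    · rw [if_pos hc]; exact ih p.1
    · rw [if_neg hc]; exact ih m

-- A's reverse dict looked up at n computes exactly B's "last matching gdp key" scan.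
-- The hypothesis ties the inner-scan accumulator (b, m) to the dict accumulator d.
lemma find_last_eq_get (gdp : List (String × List (String × String))) (n : String) :
    ∀ (d : PySem.Dict String String) (b : Bool) (m : String), (b = true → d.get? n = some m) →
    (gdp.foldl (fun d p => d.insert ((PySem.Dict.mk p.2).getD "Country Name" "") p.1) d).get? n
      = (if (gdp.foldl (fun s p => if ((PySem.Dict.mk p.2).getD "Country Name" "") == n then (true, p.1) else s) (b, m)).1
         then some (gdp.foldl (fun s p => if ((PySem.Dict.mk p.2).getD "Country Name" "") == n then (true, p.1) else s) (b, m)).2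
         else d.get? n) := by
  induction gdp with
  | nil =>
    intro d b m h
    cases b with
    | false => simp
    | true => simp [h rfl]
  | cons p rest ih =>
    intro d b m h
    simp only [List.foldl_cons]
    by_cases hc : ((PySem.Dict.mk p.2).getD "Country Name" "") = n
    · have hcb : (((PySem.Dict.mk p.2).getD "Country Name" "") == n) = true := by simp [hc]
      rw [if_pos hcb]
      rw [ih (d.insert ((PySem.Dict.mk p.2).getD "Country Name" "") p.1) true p.1
            (fun _ => by rw [hc]; exact PySem.Dict.get?_insert_self d n p.1)]
      have hf := pv_flag_stays rest n p.1
      rw [if_pos hf, if_pos hf]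
    · have hcb : (((PySem.Dict.mk p.2).getD "Country Name" "") == n) = false := by simp [hc]
      rw [if_neg (show ¬ ((((PySem.Dict.mk p.2).getD "Country Name" "") == n) = true) from by simp [hcb])]
      rw [ih (d.insert ((PySem.Dict.mk p.2).getD "Country Name" "") p.1) b m
            (fun hb => by rw [PySem.Dict.get?_insert_of_ne d p.1 (fun he => hc he.symm)]; exact h hb)]
      rw [PySem.Dict.get?_insert_of_ne d p.1 (fun he => hc he.symm)]

-- ===== VERDICT (by name: the statement is the Claim_ definition above) =====
theorem reconcile_countries_by_code_spec : Claim_equal_reconcile_countries_by_code := by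
  intro ci plot gdp _ _
  unfold Spec_reconcile_countries_by_code reconcile_countries_by_code reconcile_countries_by_code_alt
  have hstep :
      (fun (acc : PySem.Dict String String × PySem.Set String) (kv : String × String) =>
        if (gdp.foldl (fun d p => d.insert ((PySem.Dict.mk p.2).getD "Country Name" "") p.1) PySem.Dict.empty).contains kv.2
        then (acc.1.insert kv.1 ((gdp.foldl (fun d p => d.insert ((PySem.Dict.mk p.2).getD "Country Name" "") p.1) PySem.Dict.empty).getD kv.2 ""), acc.2)
        else (acc.1, PySem.Set.add acc.2 kv.1))
      = (fun acc kv =>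
        let fm : Bool × String :=
          gdp.foldl (fun s p => if ((PySem.Dict.mk p.2).getD "Country Name" "") == kv.2 then (true, p.1) else s) (false, "")
        if fm.1 then (acc.1.insert kv.1 fm.2, acc.2)
        else (acc.1, PySem.Set.add acc.2 kv.1)) := by
    funext acc kv
    have hg := find_last_eq_get gdp kv.2 PySem.Dict.empty false "" (by simp)
    rw [PySem.Dict.get?_empty] at hg
    simp only []
    rw [PySem.Dict.contains_eq_isSome_get?, PySem.Dict.getD_eq_get?_getD, hg]
    cases _hfm : (gdp.foldl (fun s p => if ((PySem.Dict.mk p.2).getD "Country Name" "") == kv.2 then (true, p.1) else s) (false, "")).1 with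
    | false => simp
    | true => simp
  exact congrArg (fun f => (let r := plot.foldl f (PySem.Dict.empty, PySem.Set.ofList []); (r.1.items, r.2))) hstep
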